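-- pv_equiv track=rewrite | github.com/binchen15/leet-python | hashtable/prob1742.py | countBalls
-- ===== SOURCE A (Python) =====
-- def countBalls(lowLimit: int, highLimit: int) -> int:
--
--
--     def sumDigits(n):
--
--         s = 0
--         while n > 0:
--             n, r = divmod(n, 10)
--             s += r
--
--         return s
--
--     d = {}
--     for i in range(lowLimit, highLimit+1):
--         s = sumDigits(i)
--         d[s] = d.get(s, 0) + 1
--
--     return max(d.values())
-- ===== SOURCE B (Python) =====
-- def countBalls(lowLimit: int, highLimit: int) -> int:
--     # Sort the digit sums and return the length of the longest run,
--     # instead of counting into a hash table and maximising afterwards.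
--
--     def digit_sum(n):
--         s = 0
--         while n > 0:
--             s += n % 10
--             n //= 10
--         return s
--
--     sums = sorted(digit_sum(n) for n in range(lowLimit, highLimit + 1))
--     best = run = 0
--     prev = None
--     for s in sums:
--         run = run + 1 if s == prev else 1
--         prev = s
--         if run > best:
--             best = run
--     return best
-- ===== Notes on version B (the rewrite author's own statement) =====
-- stated objective: alternative
-- what changed: B sorts the digit sums of the range and returns the longest run in the sorted list (sort-then-scan mode finding with a running maximum), instead of A's hash-table counting followed by a max over the dict's values; Pre_ excludes only empty ranges (lowLimit > highLimit), on which A raises ValueError.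
import Mathlib
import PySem

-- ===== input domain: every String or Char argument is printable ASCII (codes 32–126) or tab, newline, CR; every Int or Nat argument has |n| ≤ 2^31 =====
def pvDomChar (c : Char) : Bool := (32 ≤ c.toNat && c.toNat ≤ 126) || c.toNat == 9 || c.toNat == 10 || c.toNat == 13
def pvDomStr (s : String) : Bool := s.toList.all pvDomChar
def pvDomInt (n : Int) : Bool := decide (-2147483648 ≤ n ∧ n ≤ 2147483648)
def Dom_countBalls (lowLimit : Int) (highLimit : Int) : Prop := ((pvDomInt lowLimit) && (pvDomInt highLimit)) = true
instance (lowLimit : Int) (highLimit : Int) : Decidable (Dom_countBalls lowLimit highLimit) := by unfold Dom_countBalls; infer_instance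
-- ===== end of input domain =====

-- B sorts the digit sums of the range and takes the longest run in the sorted list
-- (a sort-then-scan way to find the most frequent value), instead of A's hash-table
-- counting followed by max over the dict's values. Alternative algorithm, not faster.

-- ===== PORT A =====
-- A's inner helper: s = 0; while n > 0: n, r = divmod(n, 10); s += r
def sumAux (n s : Int) : Int :=
  if h : 0 < n then sumAux (PySem.Int.floordiv n 10) (s + PySem.Int.mod n 10) else s
termination_by n.toNat
decreasing_by
  simp only [PySem.Int.floordiv_eq_ediv_of_pos (by norm_num : (0:Int) < 10)]
  omega

def sumDigits (n : Int) : Int := sumAux n 0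

def countBalls (lowLimit : Int) (highLimit : Int) : Int :=
  let d := (PySem.List.pyRange lowLimit (highLimit + 1) 1).foldl
    (fun d i => let s := sumDigits i; d.insert s (d.getD s 0 + 1)) PySem.Dict.empty
  match PySem.List.max? d.values (fun v => v) with
  | some m => m
  | none => 0   -- Python raises ValueError here (max of empty dict); excluded by Pre_

-- ===== PORT B =====
-- B's helper: s = 0; while n > 0: s += n % 10; n //= 10
def digitSumAux (n s : Int) : Int :=
  if h : 0 < n then digitSumAux (PySem.Int.floordiv n 10) (s + PySem.Int.mod n 10) else s
termination_by n.toNat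
decreasing_by
  simp only [PySem.Int.floordiv_eq_ediv_of_pos (by norm_num : (0:Int) < 10)]
  omega

def digitSum (n : Int) : Int := digitSumAux n 0

-- B's scan: for s in sums: run = run + 1 if s == prev else 1; prev = s; if run > best: best = run
def runLoop (xs : List Int) (best run : Int) (prev : Option Int) : Int :=
  match xs with
  | [] => best
  | s :: t =>
      let run' := match prev with
        | some p => if s = p then run + 1 else 1
        | none => 1
      let best' := if run' > best then run' else best
      runLoop t best' run' (some s)

def countBalls_alt (lowLimit : Int) (highLimit : Int) : Int :=
  let sums := PySem.List.sorted
    ((PySem.List.pyRange lowLimit (highLimit + 1) 1).map digitSum) (fun x => x)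
  runLoop sums 0 0 none

-- ===== PRECONDITION & SPEC =====
-- Pre_ excludes exactly the empty ranges, on which A's `max` of an empty dict raises ValueError
def Pre_countBalls (lowLimit : Int) (highLimit : Int) : Prop := lowLimit ≤ highLimit
instance (lowLimit : Int) (highLimit : Int) : Decidable (Pre_countBalls lowLimit highLimit) := by
  unfold Pre_countBalls; infer_instance

def pvWitness_countBalls : Int × Int := (-3, 14)

def Spec_countBalls (lowLimit : Int) (highLimit : Int) (out : Int) : Prop := out = countBalls_alt lowLimit highLimit
instance (lowLimit : Int) (highLimit : Int) (out : Int) : Decidable (Spec_countBalls lowLimit highLimit out) := by unfold Spec_countBalls; infer_instance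

-- ===== CLAIM (what is proved, stated in full; the proofs are below) =====
def Claim_equal_countBalls : Prop := ∀ (lowLimit : Int) (highLimit : Int), Dom_countBalls lowLimit highLimit → Pre_countBalls lowLimit highLimit → Spec_countBalls lowLimit highLimit (countBalls lowLimit highLimit)

-- ===== LEMMAS AND PROOFS =====

-- running maximum of a projection over a list (the shape both programs reduce to)
def supf (ks : List Int) (f : Int → Int) (b : Int) : Int :=
  ks.foldl (fun a k => max a (f k)) b

theorem supf_le {ks : List Int} {f : Int → Int} {b c : Int}
    (hb : b ≤ c) (hk : ∀ k ∈ ks, f k ≤ c) : supf ks f b ≤ c := by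
  induction ks generalizing b with
  | nil => exact hb
  | cons k t ih =>
      exact ih (max_le hb (hk k (by simp))) (fun x hx => hk x (by simp [hx]))

theorem supf_congr {ks : List Int} {f g : Int → Int} (b : Int)
    (h : ∀ k ∈ ks, f k = g k) : supf ks f b = supf ks g b :=
  PySem.List.foldl_congr_mem ks _ _ b (fun a k hk => by rw [h k hk])

theorem supf_set_eq {ks ks' : List Int} (f : Int → Int) (b : Int)
    (h : ∀ x, x ∈ ks ↔ x ∈ ks') : supf ks f b = supf ks' f b := by
  apply le_antisymm
  · exact supf_le (PySem.List.le_foldl_max_int ks' f b).1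
      (fun k hk => (PySem.List.le_foldl_max_int ks' f b).2 k ((h k).mp hk))
  · exact supf_le (PySem.List.le_foldl_max_int ks f b).1
      (fun k hk => (PySem.List.le_foldl_max_int ks f b).2 k ((h k).mpr hk))

-- the two digit-sum helpers are transliterations of the same while loop
theorem digitSumAux_eq_sumAux : ∀ (N : Nat) (n s : Int), n.toNat = N →
    digitSumAux n s = sumAux n s := by
  intro N
  induction N using Nat.strong_induction_on with
  | _ N ih =>
      intro n s hN
      rw [digitSumAux, sumAux]
      split_ifs with h
      · have hd : PySem.Int.floordiv n 10 = n / 10 :=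
          PySem.Int.floordiv_eq_ediv_of_pos (by norm_num)
        exact ih (PySem.Int.floordiv n 10).toNat (by rw [hd]; omega) _ _ rfl
      · rfl

theorem digitSum_eq (n : Int) : digitSum n = sumDigits n :=
  digitSumAux_eq_sumAux n.toNat n 0 rfl

-- ---- A reduces to the maximum multiplicity over the list of digit sums ----

theorem countBalls_eq_supf {low high : Int} (h : low ≤ high) :
    countBalls low high
      = supf ((PySem.List.pyRange low (high + 1)).map sumDigits)
          (fun k => (((PySem.List.pyRange low (high + 1)).map sumDigits).count k : Int)) 0 := by
  set L := (PySem.List.pyRange low (high + 1)).map sumDigits with hL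
  have hd : (PySem.List.pyRange low (high + 1)).foldl
      (fun d i => let s := sumDigits i; d.insert s (d.getD s 0 + 1)) PySem.Dict.empty
      = PySem.Dict.counter L := by
    rw [hL, ← PySem.Dict.foldl_insert_getD_add_one_eq_counter, List.foldl_map]
  have hvals : (PySem.Dict.counter L).values
      = (PySem.Set.ofList L).map (fun k => ((L.count k : Nat) : Int)) := by
    show ((PySem.Dict.counter L).items).map Prod.snd = _
    rw [PySem.Dict.items_counter, List.map_map]
    rfl
  have hLne : L ≠ [] := by
    rw [hL, PySem.List.pyRange_one_cons (show low < high + 1 by omega)]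
    simp
  obtain ⟨k0, S', hS⟩ : ∃ k0 S', PySem.Set.ofList L = k0 :: S' := by
    rcases hS0 : PySem.Set.ofList L with _ | ⟨k0, S'⟩
    · rcases List.exists_mem_of_ne_nil L hLne with ⟨x, hx⟩
      have := (PySem.Set.mem_ofList L x).mpr hx
      rw [hS0] at this
      simp at this
    · exact ⟨k0, S', rfl⟩
  set g : Int → Int := fun k => ((L.count k : Nat) : Int) with hg
  rw [countBalls]
  simp only []
  rw [hd, hvals, hS]
  show (match PySem.List.max? (g k0 :: S'.map g) (fun v => v) with
        | some m => m | none => 0) = supf L g 0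
  rw [PySem.List.max?_id_cons]
  show (S'.map g).foldl max (g k0) = supf L g 0
  rw [List.foldl_map]
  have h1 : S'.foldl (fun a k => max a (g k)) (g k0) = supf (k0 :: S') g 0 := by
    show _ = supf S' g (max 0 (g k0))
    rw [max_eq_right (by rw [hg]; positivity)]
    rfl
  rw [h1, ← hS]
  exact supf_set_eq g 0 (fun x => PySem.Set.mem_ofList L x)

-- ---- B's scan over a sorted list computes the maximum multiplicity ----

theorem runLoop_inv : ∀ (rest pre : List Int) (p : Int),
    List.Pairwise (· ≤ ·) (pre ++ rest) → p ∈ pre → (∀ x ∈ pre, x ≤ p) →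
    runLoop rest (supf pre (fun k => (pre.count k : Int)) 0) (pre.count p : Int) (some p)
      = supf (pre ++ rest) (fun k => ((pre ++ rest).count k : Int)) 0 := by
  intro rest
  induction rest with
  | nil => intro pre p _ _ _; simp [runLoop]
  | cons s t ih =>
      intro pre p hsorted hp hmax
      have hps : p ≤ s := by
        rcases (List.pairwise_append.mp hsorted) with ⟨_, _, hcross⟩
        exact hcross p hp s (by simp)
      have hassoc : pre ++ s :: t = (pre ++ [s]) ++ t := by simp
      set c : Int → Int := fun k => ((pre.count k : Nat) : Int) with hc
      set c' : Int → Int := fun k => (((pre ++ [s]).count k : Nat) : Int) with hc'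
      have hrun' : (if s = p then ((pre.count p : Nat) : Int) + 1 else 1) = c' s := by
        by_cases hsp : s = p
        · subst hsp
          simp [hc', List.count_append]
        · have hns : s ∉ pre := fun hmem => by
            have h1 := hmax s hmem
            omega
          simp [hsp, hc', List.count_append, List.count_eq_zero_of_not_mem hns]
      have hbest' : max (supf pre c 0) (c' s) = supf (pre ++ [s]) c' 0 := by
        have bnd' := PySem.List.le_foldl_max_int (pre ++ [s]) c' 0
        have bnd := PySem.List.le_foldl_max_int pre c 0
        apply le_antisymm
        · apply max_le
          · apply supf_le bnd'.1
            intro k hk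
            have : c k ≤ c' k := by
              simp only [hc, hc', List.count_append]
              push_cast
              omega
            exact le_trans this (bnd'.2 k (by simp [hk]))
          · exact bnd'.2 s (by simp)
        · apply supf_le (le_trans bnd.1 (le_max_left _ _))
          intro k hk
          by_cases hks : k = s
          · subst hks
            exact le_max_right _ _
          · have hkpre : k ∈ pre := by
              rcases List.mem_append.mp hk with h1 | h1
              · exact h1
              · simp at h1; exact absurd h1 hks
            have hkns : k ∉ [s] := by simp [hks]
            have : c' k = c k := by
              simp [hc', hc, List.count_append, List.count_eq_zero_of_not_mem hkns]
            rw [this]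
            exact le_trans (bnd.2 k hkpre) (le_max_left _ _)
      show runLoop t (if (if s = p then ((pre.count p : Nat) : Int) + 1 else 1) > supf pre c 0
            then (if s = p then ((pre.count p : Nat) : Int) + 1 else 1) else supf pre c 0)
            (if s = p then ((pre.count p : Nat) : Int) + 1 else 1) (some s) = _
      rw [hrun']
      have hifmax : (if c' s > supf pre c 0 then c' s else supf pre c 0)
          = max (supf pre c 0) (c' s) := by
        rcases max_cases (supf pre c 0) (c' s) with ⟨h1, h2⟩ | ⟨h1, h2⟩ <;>
          split_ifs <;> omega
      rw [hifmax, hbest']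
      have hstep := ih (pre ++ [s]) s (by rw [← hassoc]; exact hsorted) (by simp)
        (by intro x hx
            rcases List.mem_append.mp hx with h1 | h1
            · exact le_trans (hmax x h1) hps
            · simp at h1; omega)
      rw [hassoc]
      have hcount : ((pre ++ [s]).count s : Int) = c' s := rfl
      rw [hcount] at hstep
      exact hstep

-- B equals the maximum multiplicity over the sorted digit-sum list
theorem countBalls_alt_eq_supf {low high : Int} (h : low ≤ high) :
    countBalls_alt low high
      = supf (PySem.List.sorted ((PySem.List.pyRange low (high + 1)).map digitSum) (fun x => x))
          (fun k => ((PySem.List.sorted ((PySem.List.pyRange low (high + 1)).map digitSum)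
              (fun x => x)).count k : Int)) 0 := by
  set L := (PySem.List.pyRange low (high + 1)).map digitSum with hL
  set M := PySem.List.sorted L (fun x => x) with hM
  have hMsort : M.Pairwise (· ≤ ·) := PySem.List.sorted_pairwise L (fun x => x)
  have hLne : L ≠ [] := by
    rw [hL, PySem.List.pyRange_one_cons (show low < high + 1 by omega)]
    simp
  have hMne : M ≠ [] := by
    rw [hM]
    intro hnil
    exact hLne ((PySem.List.sorted_eq_nil_iff L (fun x => x) false).mp hnil)
  obtain ⟨s0, t, hMcons⟩ : ∃ s0 t, M = s0 :: t := by
    rcases M with _ | ⟨s0, t⟩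
    · exact absurd rfl hMne
    · exact ⟨s0, t, rfl⟩
  show runLoop M 0 0 none = supf M (fun k => ((M.count k : Nat) : Int)) 0
  rw [hMcons]
  show runLoop t (if (1:Int) > 0 then 1 else 0) 1 (some s0) = _
  have hMsort' : List.Pairwise (· ≤ ·) ([s0] ++ t) := by
    rw [List.singleton_append, ← hMcons]
    exact hMsort
  have hinv := runLoop_inv t [s0] s0 hMsort' (by simp) (by simp)
  have h1 : supf [s0] (fun k => (([s0].count k : Nat) : Int)) 0 = 1 := by
    simp [supf]
  rw [h1] at hinv
  have h2 : (([s0].count s0 : Nat) : Int) = 1 := by simp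
  rw [h2] at hinv
  simp only [List.singleton_append] at hinv
  have h10 : (if (1:Int) > 0 then (1:Int) else 0) = 1 := by norm_num
  rw [h10]
  exact hinv

-- main equivalence
theorem countBalls_eq_alt {low high : Int} (h : low ≤ high) :
    countBalls low high = countBalls_alt low high := by
  rw [countBalls_eq_supf h, countBalls_alt_eq_supf h]
  have hmap : (PySem.List.pyRange low (high + 1)).map digitSum
      = (PySem.List.pyRange low (high + 1)).map sumDigits :=
    List.map_congr_left (fun x _ => digitSum_eq x)
  rw [hmap]
  set L := (PySem.List.pyRange low (high + 1)).map sumDigits with hLdef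
  set M := PySem.List.sorted L (fun x => x) with hMdef
  have hperm : M.Perm L := PySem.List.sorted_perm L (fun x => x) false
  have hcnt : ∀ k ∈ M, ((M.count k : Nat) : Int) = ((L.count k : Nat) : Int) := by
    intro k _
    rw [hperm.count_eq]
  rw [supf_congr 0 hcnt]
  exact (supf_set_eq _ 0 (fun x => hperm.mem_iff)).symm

-- ===== VERDICT (by name: the statement is the Claim_ definition above) =====
theorem countBalls_spec : Claim_equal_countBalls := by
  intro low high _ hpre
  exact countBalls_eq_alt hpre
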